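-- pv_equiv track=rewrite | github.com/BoZhaoUT/Teaching | Winter_2016_CSCA48/Week_7/week_7.py | is_near_palindrome_op
-- ===== SOURCE A (Python) =====
-- def is_near_palindrome_op(my_str, num_changes=1):
--     ''' (str, int) -> bool
--     Return True iff my_word is within num_changes of being a palindrome.
--     REQ: num_changes >= 0
--     >>> is_near_palindrome_op("naval", 1)
--     True
--     >>> is_near_palindrome_op("naval")
--     True
--     >>> is_near_palindrome_op("palindrome", 4)
--     False
--     >>> is_near_palindrome_op("palindrome", 5)
--     True
--     '''
--     # base case
--     if len(my_str) <= 1: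
--         result = True
--     # recursive case
--     elif my_str[0] == my_str[-1]:
--         result = is_near_palindrome_op(my_str[1:-1], num_changes)
--     # recursive case
--     elif num_changes > 0:
--         result = is_near_palindrome_op(my_str[1:-1], num_changes - 1)
--     # base case
--     else:
--         result = False
--     return result
-- ===== SOURCE B (Python) =====
-- def is_near_palindrome_op(my_str, num_changes=1):
--     i, j = 0, len(my_str) - 1
--     mismatches = 0
--     while i < j:
--         if my_str[i] != my_str[j]:
--             mismatches += 1
--             if mismatches > num_changes:
--                 return False
--         i += 1
--         j -= 1
--     return True
-- ===== Notes on version B (the rewrite author's own statement) =====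
-- stated objective: faster
-- what changed: Replaced A's recursion that repeatedly slices my_str[1:-1] (each slice copies the string) with a single two-pointer scan that counts mismatched pairs and returns False as soon as the count exceeds num_changes.
import Mathlib
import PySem

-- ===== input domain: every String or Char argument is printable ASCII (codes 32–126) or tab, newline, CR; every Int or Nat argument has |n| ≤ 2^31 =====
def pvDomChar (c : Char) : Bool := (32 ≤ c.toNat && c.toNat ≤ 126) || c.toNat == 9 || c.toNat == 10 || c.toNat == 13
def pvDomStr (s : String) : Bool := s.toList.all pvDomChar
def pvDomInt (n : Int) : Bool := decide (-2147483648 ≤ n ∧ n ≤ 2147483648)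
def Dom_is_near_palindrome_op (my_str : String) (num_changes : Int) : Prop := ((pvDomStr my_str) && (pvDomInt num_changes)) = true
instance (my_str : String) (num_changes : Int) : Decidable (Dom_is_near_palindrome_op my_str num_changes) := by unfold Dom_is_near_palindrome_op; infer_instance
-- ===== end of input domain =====

-- B replaces A's recursion on my_str[1:-1] slices by a two-pointer mismatch count with early exit (objective: faster; a timing run measured B faster at the largest size).


-- ===== PORT A =====
-- A's recursion, on the string's character list; my_str[1:-1] is PySem.List.slice l 1 (-1)
def pvAGo (l : List Char) (n : Int) : Bool :=
  if l.length ≤ 1 then true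
  else if PySem.List.pyGet? l 0 = PySem.List.pyGet? l (-1) then
    pvAGo (PySem.List.slice l (some 1) (some (-1))) n
  else if n > 0 then
    pvAGo (PySem.List.slice l (some 1) (some (-1))) (n - 1)
  else false
termination_by l.length
decreasing_by
  all_goals
    simp only [PySem.List.length_slice, PySem.List.clampIdx_neg_one] at *
    have := PySem.List.clampIdx_le l.length 1
    omega

def is_near_palindrome_op (my_str : String) (num_changes : Int) : Bool :=
  pvAGo my_str.toList num_changes

-- ===== PORT B =====
-- B's while loop: two pointers i, j, a mismatch counter, early False once the budget is exceeded
def pvBGo (l : List Char) (i j : Int) (m : Nat) (n : Int) : Bool :=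
  if i < j then
    if PySem.List.pyGet? l i = PySem.List.pyGet? l j then
      pvBGo l (i + 1) (j - 1) m n
    else if ((m + 1 : Nat) : Int) > n then false
    else pvBGo l (i + 1) (j - 1) (m + 1) n
  else true
termination_by (j - i).toNat
decreasing_by all_goals omega

def is_near_palindrome_op_alt (my_str : String) (num_changes : Int) : Bool :=
  pvBGo my_str.toList 0 ((my_str.toList.length : Int) - 1) 0 num_changes

-- ===== PRECONDITION & SPEC =====
def Spec_is_near_palindrome_op (my_str : String) (num_changes : Int) (out : Bool) : Prop := out = is_near_palindrome_op_alt my_str num_changes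
instance (my_str : String) (num_changes : Int) (out : Bool) : Decidable (Spec_is_near_palindrome_op my_str num_changes out) := by unfold Spec_is_near_palindrome_op; infer_instance

-- ===== CLAIM (what is proved, stated in full; the proofs are below) =====
def Claim_equal_is_near_palindrome_op : Prop := ∀ (my_str : String) (num_changes : Int), Dom_is_near_palindrome_op my_str num_changes → Spec_is_near_palindrome_op my_str num_changes (is_near_palindrome_op my_str num_changes)

-- ===== LEMMAS AND PROOFS =====

-- proof-only reference count: number of mismatched outer pairs, peeling both ends
def mcount (l : List Char) : Nat :=
  if l.length ≤ 1 then 0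
  else (if l[0]? = l.getLast? then 0 else 1) + mcount l.tail.dropLast
termination_by l.length
decreasing_by simp [List.length_dropLast, List.length_tail]; omega

lemma mcount_short (l : List Char) (h : l.length ≤ 1) : mcount l = 0 := by
  rw [mcount]; simp [h]

lemma slice_one_neg_one (l : List Char) :
    PySem.List.slice l (some 1) (some (-1)) = l.tail.dropLast := by
  simp [PySem.List.slice, PySem.List.clampIdx]
  rcases l with _ | ⟨a, t⟩
  · simp
  · simp [List.dropLast_eq_take]

-- A returns True iff the string is a palindrome or the mismatch count is at most num_changes
lemma pvAGo_eq_mcount (l : List Char) (n : Int) :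
    pvAGo l n = (decide (mcount l = 0) || decide ((mcount l : Int) ≤ n)) := by
  fun_induction pvAGo l n with
  | case1 l n h => rw [mcount]; simp [h]
  | case2 l n h hc ih =>
      rw [ih, slice_one_neg_one]
      have : mcount l = mcount l.tail.dropLast := by
        rw [mcount]
        simp only [PySem.List.pyGet?_zero, PySem.List.pyGet?_neg_one] at hc
        simp [h, hc]
      rw [this]
  | case3 l n h hc hn ih =>
      rw [ih, slice_one_neg_one]
      have : mcount l = 1 + mcount l.tail.dropLast := by
        rw [mcount]
        simp only [PySem.List.pyGet?_zero, PySem.List.pyGet?_neg_one] at hc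
        simp [h, hc]
      rw [this]
      rw [Bool.eq_iff_iff]
      simp only [Bool.or_eq_true, decide_eq_true_eq]
      push_cast
      omega
  | case4 l n h hc hn =>
      have : mcount l = 1 + mcount l.tail.dropLast := by
        rw [mcount]
        simp only [PySem.List.pyGet?_zero, PySem.List.pyGet?_neg_one] at hc
        simp [h, hc]
      rw [this]
      rw [Bool.eq_iff_iff]
      simp only [Bool.or_eq_true, decide_eq_true_eq, Bool.false_eq_true, false_iff, not_or]
      push_cast
      omega

lemma take_tail_aux (x : List Char) (n : Nat) : (x.take n).tail = x.tail.take (n - 1) := by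
  rcases x with _ | ⟨y, t⟩ <;> rcases n with _ | n <;> simp

-- peeling the outer pair of the segment [i..j]
lemma seg_decomp (l : List Char) (i j : Int) (hi : 0 ≤ i) (hlt : i < j)
    (hj : j < l.length) :
    mcount ((l.drop i.toNat).take (j - i + 1).toNat)
      = (if PySem.List.pyGet? l i = PySem.List.pyGet? l j then 0 else 1)
        + mcount ((l.drop (i + 1).toNat).take (j - 1 - (i + 1) + 1).toNat) := by
  set a := i.toNat with ha
  have hbj : j.toNat = j := by omega
  set b := j.toNat with hb
  have hab : a < b := by omega
  have hbl : b < l.length := by omega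
  have h1 : (i + 1).toNat = a + 1 := by omega
  have h2 : (j - 1 - (i + 1) + 1).toNat = b - a - 1 := by omega
  have h3 : (j - i + 1).toNat = b - a + 1 := by omega
  rw [h1, h2, h3]
  have hseglen : ((l.drop a).take (b - a + 1)).length = b - a + 1 := by
    simp [List.length_take, List.length_drop]; omega
  have hget : PySem.List.pyGet? l i = l[a]? := PySem.List.pyGet?_of_nonneg l hi
  have hgetj : PySem.List.pyGet? l j = l[b]? := PySem.List.pyGet?_of_nonneg l (by omega)
  have hfirst : ((l.drop a).take (b - a + 1))[0]? = l[a]? := by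
    rw [List.getElem?_take_of_lt (by omega), List.getElem?_drop]
    simp
  have hlast : ((l.drop a).take (b - a + 1)).getLast? = l[b]? := by
    rw [List.getLast?_eq_getElem?, hseglen]
    rw [List.getElem?_take_of_lt (by omega), List.getElem?_drop]
    congr 1; omega
  have hcore : ((l.drop a).take (b - a + 1)).tail.dropLast
      = (l.drop (a + 1)).take (b - a - 1) := by
    rw [take_tail_aux, List.tail_drop, List.dropLast_eq_take, List.length_take,
      List.take_take]
    congr 1
    simp [List.length_drop]
    omega
  conv_lhs => rw [mcount]
  have hlen2 : ¬ (((l.drop a).take (b - a + 1)).length ≤ 1) := by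
    rw [hseglen]; omega
  rw [if_neg hlen2, hfirst, hlast, hcore, hget, hgetj]

-- B's loop decides exactly 'm + mismatches of segment [i..j] is 0 or at most n'
lemma pvBGo_eq (l : List Char) (i j : Int) (m : Nat) (n : Int)
    (hi : 0 ≤ i) (hj : j < l.length) (hm : m = 0 ∨ (m : Int) ≤ n) :
    pvBGo l i j m n =
      (decide (m + mcount ((l.drop i.toNat).take (j - i + 1).toNat) = 0)
        || decide (((m + mcount ((l.drop i.toNat).take (j - i + 1).toNat) : Nat) : Int) ≤ n)) := by
  fun_induction pvBGo l i j m n with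
  | case1 i j m hlt hc ih =>
      rw [ih (by omega) (by omega) hm, seg_decomp l i j hi hlt hj, if_pos hc]
      simp
  | case2 i j m hlt hc hgt =>
      rw [seg_decomp l i j hi hlt hj, if_neg hc]
      rw [Bool.eq_iff_iff]
      simp only [Bool.or_eq_true, decide_eq_true_eq, Bool.false_eq_true, false_iff, not_or]
      push_cast at hgt ⊢
      omega
  | case3 i j m hlt hc hgt ih =>
      have hm1 : m + 1 = 0 ∨ ((m + 1 : Nat) : Int) ≤ n := by
        right; push_cast at hgt ⊢; omega
      rw [ih (by omega) (by omega) hm1, seg_decomp l i j hi hlt hj, if_neg hc]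
      rw [Bool.eq_iff_iff]
      simp only [Bool.or_eq_true, decide_eq_true_eq]
      push_cast
      omega
  | case4 i j m hlt =>
      rw [mcount_short _ (by simp [List.length_take, List.length_drop]; omega)]
      rw [Bool.eq_iff_iff]
      simp only [Bool.or_eq_true, decide_eq_true_eq]
      constructor
      · intro _
        rcases hm with h | h
        · left; omega
        · right; push_cast; omega
      · intro _; trivial

-- ===== VERDICT (by name: the statement is the Claim_ definition above) =====
theorem is_near_palindrome_op_spec : Claim_equal_is_near_palindrome_op := by
  intro s n _
  unfold Spec_is_near_palindrome_op is_near_palindrome_op is_near_palindrome_op_alt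
  set l := s.toList with hl
  have hb := pvBGo_eq l 0 ((l.length : Int) - 1) 0 n (le_refl 0) (by omega) (Or.inl rfl)
  have h4 : ((l.length : Int) - 1 - 0 + 1).toNat = l.length := by omega
  rw [h4] at hb
  simp only [Int.toNat_zero, List.drop_zero, List.take_length, Nat.zero_add] at hb
  rw [pvAGo_eq_mcount, hb]
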